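-- pv_equiv track=rewrite | github.com/AbhishekAhirvar/ai_astrologer | backend/astrology.py | get_house_lords_ruled
-- ===== SOURCE A (Python) =====
-- SIGN_LORDS = {
--     0: 'Mars',      # Aries
--     1: 'Venus',     # Taurus
--     2: 'Mercury',   # Gemini
--     3: 'Moon',      # Cancer
--     4: 'Sun',       # Leo
--     5: 'Mercury',   # Virgo
--     6: 'Venus',     # Libra
--     7: 'Mars',      # Scorpio
--     8: 'Jupiter',   # Sagittarius
--     9: 'Saturn',    # Capricorn
--     10: 'Saturn',   # Aquarius
--     11: 'Jupiter'   # Pisces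
-- }
--
-- def get_ordinal_suffix(n: int) -> str:
--     """Get ordinal suffix for a number (1st, 2nd, 3rd, etc.)"""
--     if 11 <= n % 100 <= 13:
--         return f"{n}th"
--     suffixes = {1: "st", 2: "nd", 3: "rd"}
--     return f"{n}{suffixes.get(n % 10, 'th')}"
--
-- def get_house_lords_ruled(planet_name: str, asc_sign_num: int) -> str:
--     """
--     Get houses ruled by a planet.
--
--     Args:
--         planet_name: Name of the planet
--         asc_sign_num: Ascendant sign number
--
--     Returns:
--         Formatted string of house numbers (e.g., "1st, 8th")
--     """
--     planet_cap = planet_name.capitalize()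
--     houses_ruled = []
--
--     for house in range(1, 13):
--         house_sign = (asc_sign_num + house - 1) % 12
--         lord = SIGN_LORDS.get(house_sign)
--         if lord == planet_cap:
--             houses_ruled.append(get_ordinal_suffix(house))
--
--     return ", ".join(houses_ruled) if houses_ruled else "-"
-- ===== SOURCE B (Python) =====
-- PLANET_SIGNS = {
--     'Sun': (4,), 'Moon': (3,), 'Mars': (0, 7), 'Mercury': (2, 5),
--     'Jupiter': (8, 11), 'Venus': (1, 6), 'Saturn': (9, 10)
-- }
--
-- def _ordinal(n: int) -> str:
--     if 11 <= n % 100 <= 13: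
--         suf = "th"
--     else:
--         d = n % 10
--         suf = "st" if d == 1 else "nd" if d == 2 else "rd" if d == 3 else "th"
--     return f"{n}{suf}"
--
-- def get_house_lords_ruled(planet_name: str, asc_sign_num: int) -> str:
--     signs = PLANET_SIGNS.get(planet_name.capitalize())
--     if signs is None:
--         return "-"
--     houses = sorted((s - asc_sign_num) % 12 + 1 for s in signs)
--     return ", ".join(_ordinal(h) for h in houses)
-- ===== Notes on version B (the rewrite author's own statement) =====
-- stated objective: alternative
-- what changed: B drops the 12-house scan of SIGN_LORDS entirely: a precomputed planet->ruled-signs table is looked up once, each ruled sign s is mapped directly to its house ((s - asc_sign_num) % 12) + 1, the (at most two) houses are sorted and their ordinals joined; the ordinal suffix is computed by an if-chain instead of a dict.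
import Mathlib
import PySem

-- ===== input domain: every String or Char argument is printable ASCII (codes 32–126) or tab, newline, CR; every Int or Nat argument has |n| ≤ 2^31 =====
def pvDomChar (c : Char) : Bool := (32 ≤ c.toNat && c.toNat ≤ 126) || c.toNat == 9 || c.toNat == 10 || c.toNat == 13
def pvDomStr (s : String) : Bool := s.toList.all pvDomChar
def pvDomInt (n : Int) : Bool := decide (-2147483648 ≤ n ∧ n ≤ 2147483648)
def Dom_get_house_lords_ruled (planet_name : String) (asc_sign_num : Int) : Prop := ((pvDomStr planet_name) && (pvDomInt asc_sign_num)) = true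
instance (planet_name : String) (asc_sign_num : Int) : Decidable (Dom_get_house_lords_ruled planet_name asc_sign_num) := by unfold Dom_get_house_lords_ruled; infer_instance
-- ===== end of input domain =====

-- B replaces A's 12-house scan of SIGN_LORDS by a direct lookup in a precomputed
-- planet->ruled-signs table, mapping each ruled sign straight to its house number;
-- an alternative O(1) shape with the same result.

-- ===== PORT A =====
-- str.capitalize (ASCII): first char uppercased, the rest lowercased (used by both Pythons).
def pyCapitalize (s : String) : String :=
  match s.toList with
  | [] => String.ofList []
  | c :: rest => String.ofList (PySem.Chars.upperChar c :: rest.map PySem.Chars.lowerChar)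

def pvSIGN_LORDS : PySem.Dict Int String :=
  PySem.Dict.ofList [(0, "Mars"), (1, "Venus"), (2, "Mercury"), (3, "Moon"),
    (4, "Sun"), (5, "Mercury"), (6, "Venus"), (7, "Mars"), (8, "Jupiter"),
    (9, "Saturn"), (10, "Saturn"), (11, "Jupiter")]

def pvSuffixes : PySem.Dict Int String :=
  PySem.Dict.ofList [(1, "st"), (2, "nd"), (3, "rd")]

def get_ordinal_suffix (n : Int) : String :=
  if 11 ≤ PySem.Int.mod n 100 ∧ PySem.Int.mod n 100 ≤ 13 then
    String.ofList ((PySem.Int.toStr n).toList ++ "th".toList)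
  else
    String.ofList ((PySem.Int.toStr n).toList ++ (PySem.Dict.getD pvSuffixes (PySem.Int.mod n 10) "th").toList)

def get_house_lords_ruled (planet_name : String) (asc_sign_num : Int) : String :=
  let planet_cap := pyCapitalize planet_name
  let houses_ruled := (PySem.List.pyRange 1 13 1).foldl (fun acc house =>
    let house_sign := PySem.Int.mod (asc_sign_num + house - 1) 12
    if pvSIGN_LORDS.get? house_sign == some planet_cap then
      acc ++ [get_ordinal_suffix house]
    else acc) []
  if houses_ruled ≠ [] then PySem.Str.join ", " houses_ruled else "-"

-- ===== PORT B =====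
def pvPLANET_SIGNS : PySem.Dict String (List Int) :=
  PySem.Dict.ofList [("Sun", [4]), ("Moon", [3]), ("Mars", [0, 7]), ("Mercury", [2, 5]),
    ("Jupiter", [8, 11]), ("Venus", [1, 6]), ("Saturn", [9, 10])]

def pvOrdinal (n : Int) : String :=
  let suf :=
    if 11 ≤ PySem.Int.mod n 100 ∧ PySem.Int.mod n 100 ≤ 13 then "th"
    else
      let d := PySem.Int.mod n 10
      if d = 1 then "st" else if d = 2 then "nd" else if d = 3 then "rd" else "th"
  String.ofList ((PySem.Int.toStr n).toList ++ suf.toList)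

def get_house_lords_ruled_alt (planet_name : String) (asc_sign_num : Int) : String :=
  match pvPLANET_SIGNS.get? (pyCapitalize planet_name) with
  | none => "-"
  | some signs =>
    let houses := PySem.List.sorted
      (signs.map (fun s => PySem.Int.mod (s - asc_sign_num) 12 + 1)) (fun x => x) false
    PySem.Str.join ", " (houses.map pvOrdinal)

-- ===== PRECONDITION & SPEC =====
def Spec_get_house_lords_ruled (planet_name : String) (asc_sign_num : Int) (out : String) : Prop := out = get_house_lords_ruled_alt planet_name asc_sign_num
instance (planet_name : String) (asc_sign_num : Int) (out : String) : Decidable (Spec_get_house_lords_ruled planet_name asc_sign_num out) := by unfold Spec_get_house_lords_ruled; infer_instance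

-- ===== CLAIM (what is proved, stated in full; the proofs are below) =====
def Claim_equal_get_house_lords_ruled : Prop := ∀ (planet_name : String) (asc_sign_num : Int), Dom_get_house_lords_ruled planet_name asc_sign_num → Spec_get_house_lords_ruled planet_name asc_sign_num (get_house_lords_ruled planet_name asc_sign_num)

-- ===== LEMMAS AND PROOFS =====

-- A's body with the ascendant already reduced mod 12.
def coreA (cap : String) (r : Int) : String :=
  let houses_ruled := (PySem.List.pyRange 1 13 1).foldl (fun acc house =>
    if pvSIGN_LORDS.get? (PySem.Int.mod (r + house - 1) 12) == some cap then
      acc ++ [get_ordinal_suffix house]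
    else acc) []
  if houses_ruled ≠ [] then PySem.Str.join ", " houses_ruled else "-"

-- B's body with the ascendant already reduced mod 12.
def coreB (cap : String) (r : Int) : String :=
  match pvPLANET_SIGNS.get? cap with
  | none => "-"
  | some signs =>
    let houses := PySem.List.sorted
      (signs.map (fun s => PySem.Int.mod (s - r) 12 + 1)) (fun x => x) false
    PySem.Str.join ", " (houses.map pvOrdinal)

theorem mod12_shift (a c : Int) :
    PySem.Int.mod (a + c) 12 = PySem.Int.mod (PySem.Int.mod a 12 + c) 12 := by
  rw [PySem.Int.mod_eq_emod_of_pos (b := 12) (by norm_num),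
      PySem.Int.mod_eq_emod_of_pos (b := 12) (by norm_num),
      PySem.Int.mod_eq_emod_of_pos (b := 12) (by norm_num)]
  omega

theorem mod12_shift_sub (a c : Int) :
    PySem.Int.mod (c - a) 12 = PySem.Int.mod (c - PySem.Int.mod a 12) 12 := by
  rw [PySem.Int.mod_eq_emod_of_pos (b := 12) (by norm_num),
      PySem.Int.mod_eq_emod_of_pos (b := 12) (by norm_num),
      PySem.Int.mod_eq_emod_of_pos (b := 12) (by norm_num)]
  omega

theorem A_eq_coreA (p : String) (a : Int) :
    get_house_lords_ruled p a = coreA (pyCapitalize p) (PySem.Int.mod a 12) := by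
  simp only [get_house_lords_ruled, coreA]
  have hf : (fun (acc : List String) house =>
      if pvSIGN_LORDS.get? (PySem.Int.mod (a + house - 1) 12) == some (pyCapitalize p) then
        acc ++ [get_ordinal_suffix house]
      else acc)
      = (fun acc house =>
      if pvSIGN_LORDS.get? (PySem.Int.mod (PySem.Int.mod a 12 + house - 1) 12) == some (pyCapitalize p) then
        acc ++ [get_ordinal_suffix house]
      else acc) := by
    funext acc house
    rw [show a + house - 1 = a + (house - 1) by ring,
        show PySem.Int.mod a 12 + house - 1 = PySem.Int.mod a 12 + (house - 1) by ring,
        mod12_shift a (house - 1)]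
  rw [hf]

theorem B_eq_coreB (p : String) (a : Int) :
    get_house_lords_ruled_alt p a = coreB (pyCapitalize p) (PySem.Int.mod a 12) := by
  simp only [get_house_lords_ruled_alt, coreB]
  have hf : (fun (s : Int) => PySem.Int.mod (s - a) 12 + 1)
      = (fun s => PySem.Int.mod (s - PySem.Int.mod a 12) 12 + 1) := by
    funext s
    rw [mod12_shift_sub a s]
  rw [hf]

theorem get?_ne_of_not_lord (cap : String) (h : ∀ q ∈ pvSIGN_LORDS.items, q.2 ≠ cap) (k : Int) :
    (pvSIGN_LORDS.get? k == some cap) = false := by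
  cases hg : pvSIGN_LORDS.get? k with
  | none => rfl
  | some v =>
    have hmem := PySem.Dict.mem_items_of_get?_eq_some _ hg
    have := h _ hmem
    simp_all

theorem foldl_acc_of_false {α β : Type} (l : List β) (f : List α → β → List α)
    (h : ∀ acc x, f acc x = acc) (init : List α) : l.foldl f init = init := by
  induction l generalizing init with
  | nil => rfl
  | cons y t ih => simp [List.foldl, h, ih]

theorem planet_get?_none (cap : String) (h : ∀ q ∈ pvSIGN_LORDS.items, q.2 ≠ cap) :
    pvPLANET_SIGNS.get? cap = none := by
  cases hg : pvPLANET_SIGNS.get? cap with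
  | none => rfl
  | some v =>
    exfalso
    have hmem := PySem.Dict.mem_items_of_get?_eq_some _ hg
    fin_cases hmem <;> [exact h (4, "Sun") (by decide) rfl;
      exact h (3, "Moon") (by decide) rfl;
      exact h (0, "Mars") (by decide) rfl;
      exact h (2, "Mercury") (by decide) rfl;
      exact h (8, "Jupiter") (by decide) rfl;
      exact h (1, "Venus") (by decide) rfl;
      exact h (9, "Saturn") (by decide) rfl]

theorem core_eq (cap : String) (r : Int) (h0 : 0 ≤ r) (h1 : r < 12) :
    coreA cap r = coreB cap r := by
  by_cases hM : cap = "Mars"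
  · subst hM; interval_cases r <;> decide
  by_cases hV : cap = "Venus"
  · subst hV; interval_cases r <;> decide
  by_cases hMe : cap = "Mercury"
  · subst hMe; interval_cases r <;> decide
  by_cases hMo : cap = "Moon"
  · subst hMo; interval_cases r <;> decide
  by_cases hS : cap = "Sun"
  · subst hS; interval_cases r <;> decide
  by_cases hJ : cap = "Jupiter"
  · subst hJ; interval_cases r <;> decide
  by_cases hSa : cap = "Saturn"
  · subst hSa; interval_cases r <;> decide
  -- cap is none of the lords: both sides are "-"
  have hnot : ∀ q ∈ pvSIGN_LORDS.items, q.2 ≠ cap := by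
    intro q hq
    fin_cases hq <;> simp_all [Ne, eq_comm]
  have hA : coreA cap r = "-" := by
    unfold coreA
    rw [foldl_acc_of_false _ _ (by
      intro acc x
      rw [get?_ne_of_not_lord cap hnot]
      simp)]
    simp
  have hB : coreB cap r = "-" := by
    unfold coreB
    rw [planet_get?_none cap hnot]
  rw [hA, hB]

theorem mod12_bounds (a : Int) : 0 ≤ PySem.Int.mod a 12 ∧ PySem.Int.mod a 12 < 12 := by
  rw [PySem.Int.mod_eq_emod_of_pos (b := 12) (by norm_num)]
  omega

-- ===== VERDICT (by name: the statement is the Claim_ definition above) =====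
theorem get_house_lords_ruled_spec : Claim_equal_get_house_lords_ruled := by
  intro p a _
  unfold Spec_get_house_lords_ruled
  rw [A_eq_coreA, B_eq_coreB,
      core_eq _ _ (mod12_bounds a).1 (mod12_bounds a).2]
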